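-- pv_equiv track=rewrite | github.com/beercafeguy/DataStructuresAndAlgos | python/find_pairs_with_diff.py | find_diff_hash_map
-- ===== SOURCE A (Python) =====
-- def find_diff_hash_map(arr, k):
--     element_to_indices = {}
--     result = []
--
--     for i, element in enumerate(arr):
--         complement1 = element - k
--         if complement1 in element_to_indices: # if the complement value is present in map keys
--             indices = element_to_indices[complement1]
--             for j in indices:
--                 result.append((j, i))
--
--         complement2 = k + element
--         if complement2 in element_to_indices:
--             indices = element_to_indices[complement2]
--             for j in indices:
--                 result.append((j,i))
--
--         if element in element_to_indices:
--             element_to_indices[element].append(i)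
--         else:
--             element_to_indices[element] = [i]
--
--     return result
-- ===== SOURCE B (Python) =====
-- def find_diff_hash_map(arr, k):
--     result = []
--     for i in range(len(arr)):
--         for j in range(i):
--             if arr[j] == arr[i] - k:
--                 result.append((j, i))
--         for j in range(i):
--             if arr[j] == arr[i] + k:
--                 result.append((j, i))
--     return result
-- ===== Notes on version B (the rewrite author's own statement) =====
-- stated objective: simpler
-- what changed: Replaced the hash map of value->index-lists with two plain nested scans over earlier indices (first the -k matches, then the +k matches), which reproduces A's output order without any auxiliary structure.
import Mathlib
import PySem

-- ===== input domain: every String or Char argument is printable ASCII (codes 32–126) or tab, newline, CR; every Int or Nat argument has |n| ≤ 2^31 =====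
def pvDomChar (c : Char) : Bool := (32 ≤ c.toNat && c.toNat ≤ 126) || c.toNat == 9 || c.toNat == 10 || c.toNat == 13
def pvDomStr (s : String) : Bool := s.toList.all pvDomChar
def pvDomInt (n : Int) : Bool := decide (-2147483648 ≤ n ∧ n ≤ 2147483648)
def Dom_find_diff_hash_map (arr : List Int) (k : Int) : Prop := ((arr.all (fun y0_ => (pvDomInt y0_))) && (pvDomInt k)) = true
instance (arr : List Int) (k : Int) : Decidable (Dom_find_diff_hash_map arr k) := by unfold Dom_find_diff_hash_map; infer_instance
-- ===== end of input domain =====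

-- B replaces A's hash map with two plain nested scans over earlier indices; objective: simpler.

-- ===== PORT A =====
-- one iteration of A's loop body: state = (element_to_indices, result), item = (i, element)
def aStep (k : Int) (st : PySem.Dict Int (List Int) × List (Int × Int)) (p : Int × Int) :
    PySem.Dict Int (List Int) × List (Int × Int) :=
  let d := st.1
  let i := p.1
  let element := p.2
  let result :=
    match d.get? (element - k) with
    | some indices => indices.foldl (fun r j => r ++ [(j, i)]) st.2
    | none => st.2
  let result :=
    match d.get? (k + element) with
    | some indices => indices.foldl (fun r j => r ++ [(j, i)]) result
    | none => result
  let d :=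
    match d.get? element with
    | some _ => d.modify element [] (fun l => l ++ [i])
    | none => d.insert element [i]
  (d, result)

def find_diff_hash_map (arr : List Int) (k : Int) : List (Int × Int) :=
  ((PySem.List.enumerate arr).foldl (aStep k) (PySem.Dict.empty, [])).2

-- ===== PORT B =====
def find_diff_hash_map_alt (arr : List Int) (k : Int) : List (Int × Int) :=
  (List.range arr.length).foldl (fun res i =>
    let res := (List.range i).foldl
      (fun r j => if arr.getD j 0 = arr.getD i 0 - k then r ++ [((j : Int), (i : Int))] else r) res
    (List.range i).foldl
      (fun r j => if arr.getD j 0 = arr.getD i 0 + k then r ++ [((j : Int), (i : Int))] else r) res) []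

-- ===== PRECONDITION & SPEC =====
def Spec_find_diff_hash_map (arr : List Int) (k : Int) (out : List (Int × Int)) : Prop := out = find_diff_hash_map_alt arr k
instance (arr : List Int) (k : Int) (out : List (Int × Int)) : Decidable (Spec_find_diff_hash_map arr k out) := by unfold Spec_find_diff_hash_map; infer_instance

-- ===== CLAIM (what is proved, stated in full; the proofs are below) =====
def Claim_equal_find_diff_hash_map : Prop := ∀ (arr : List Int) (k : Int), Dom_find_diff_hash_map arr k → Spec_find_diff_hash_map arr k (find_diff_hash_map arr k)

-- ===== LEMMAS AND PROOFS =====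

-- indices j < n with arr[j] = v, as Ints in increasing order (what A's dict stores under key v)
def idxs (arr : List Int) (n : Nat) (v : Int) : List Int :=
  ((List.range n).filter (fun j => arr.getD j 0 = v)).map (fun j => ((j : Nat) : Int))

theorem dict_get?_total (e : PySem.Dict Int (List Int)) (v : Int) :
    e.get? v = if e.contains v = true then some (e.getD v []) else none := by
  rw [PySem.Dict.contains_eq_isSome_get?, PySem.Dict.getD_eq_get?_getD]
  cases e.get? v <;> simp

theorem dict_get?_modify (d : PySem.Dict Int (List Int)) (x v : Int) (f : List Int → List Int) :
    (d.modify x [] f).get? v = if v = x then some (f (d.getD x [])) else d.get? v := by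
  rw [dict_get?_total, PySem.Dict.contains_modify, PySem.Dict.getD_modify]
  by_cases h : v = x
  · simp [h]
  · simp [h, ← dict_get?_total]

-- A's inner `for j in indices: result.append((j, i))` loop, as an append of a map
theorem foldl_pairs (L : List Int) (m : Int) (base : List (Int × Int)) :
    L.foldl (fun r j => r ++ [(j, m)]) base = base ++ L.map (fun j => (j, m)) :=
  PySem.List.foldl_append_singleton_eq_map _ L base

-- B's inner `for j in range(i): if …: result.append((j, i))` loop, as an append of a filtered map
theorem foldl_if_pair (c m : Int) (n : Nat) (g : List Int) (acc : List (Int × Int)) :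
    (List.range n).foldl (fun r j => if g.getD j 0 = c then r ++ [((j : Int), m)] else r) acc
      = acc ++ ((List.range n).filter (fun j => g.getD j 0 = c)).map (fun j : Nat => ((j : Int), m)) := by
  have h := PySem.List.foldl_append_if (fun j : Nat => decide (g.getD j 0 = c))
    (fun j : Nat => ((j : Int), m)) (List.range n) acc
  simp only [decide_eq_true_eq] at h
  exact h

theorem idxs_map_pair (xs : List Int) (n : Nat) (v m : Int) :
    (idxs xs n v).map (fun j => (j, m))
      = ((List.range n).filter (fun j => xs.getD j 0 = v)).map (fun j : Nat => ((j : Int), m)) := by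
  unfold idxs
  rw [List.map_map]
  rfl

theorem idxs_append (xs : List Int) (x v : Int) :
    idxs (xs ++ [x]) (xs.length + 1) v
      = idxs xs xs.length v ++ (if x = v then [((xs.length : Nat) : Int)] else []) := by
  unfold idxs
  rw [List.range_succ, List.filter_append, List.map_append]
  congr 1
  · congr 1
    apply List.filter_congr
    intro j hj
    rw [List.getD_append _ _ _ j (List.mem_range.mp hj)]
  · have hx : (xs ++ [x]).getD xs.length 0 = x := by
      rw [List.getD_append_right _ _ _ _ le_rfl]; simp
    by_cases h : x = v
    · simp [h]
    · simp [h]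

theorem alt_append (xs : List Int) (x k : Int) :
    find_diff_hash_map_alt (xs ++ [x]) k =
      find_diff_hash_map_alt xs k
      ++ (idxs xs xs.length (x - k)).map (fun j => (j, ((xs.length : Nat) : Int)))
      ++ (idxs xs xs.length (k + x)).map (fun j => (j, ((xs.length : Nat) : Int))) := by
  unfold find_diff_hash_map_alt
  have hlen : (xs ++ [x]).length = xs.length + 1 := by simp
  rw [hlen, List.range_succ, List.foldl_append]
  have hx : (xs ++ [x]).getD xs.length 0 = x := by
    rw [List.getD_append_right _ _ _ _ le_rfl]; simp
  have houter :
      (List.range xs.length).foldl (fun res i =>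
        let res := (List.range i).foldl
          (fun r j => if (xs ++ [x]).getD j 0 = (xs ++ [x]).getD i 0 - k then r ++ [((j : Int), (i : Int))] else r) res
        (List.range i).foldl
          (fun r j => if (xs ++ [x]).getD j 0 = (xs ++ [x]).getD i 0 + k then r ++ [((j : Int), (i : Int))] else r) res)
        ([] : List (Int × Int))
      = (List.range xs.length).foldl (fun res i =>
        let res := (List.range i).foldl
          (fun r j => if xs.getD j 0 = xs.getD i 0 - k then r ++ [((j : Int), (i : Int))] else r) res
        (List.range i).foldl
          (fun r j => if xs.getD j 0 = xs.getD i 0 + k then r ++ [((j : Int), (i : Int))] else r) res)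
        ([] : List (Int × Int)) := by
    apply PySem.List.foldl_congr_mem
    intro acc i hi
    have hgi : (xs ++ [x]).getD i 0 = xs.getD i 0 :=
      List.getD_append _ _ _ i (List.mem_range.mp hi)
    have hinner : ∀ (c : Int) (acc' : List (Int × Int)),
        (List.range i).foldl
          (fun r j => if (xs ++ [x]).getD j 0 = c then r ++ [((j : Int), (i : Int))] else r) acc'
        = (List.range i).foldl
          (fun r j => if xs.getD j 0 = c then r ++ [((j : Int), (i : Int))] else r) acc' := by
      intro c acc'
      apply PySem.List.foldl_congr_mem
      intro a j hj
      rw [List.getD_append _ _ _ j (lt_trans (List.mem_range.mp hj) (List.mem_range.mp hi))]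
    simp only [hgi, hinner]
  rw [houter]
  simp only [List.foldl_cons, List.foldl_nil, hx]
  rw [foldl_if_pair, foldl_if_pair]
  have hf : ∀ c : Int, List.filter (fun j => decide ((xs ++ [x]).getD j 0 = c)) (List.range xs.length)
      = List.filter (fun j => decide (xs.getD j 0 = c)) (List.range xs.length) := by
    intro c
    apply List.filter_congr
    intro j hj
    rw [List.getD_append _ _ _ j (List.mem_range.mp hj)]
  rw [hf, hf, idxs_map_pair, idxs_map_pair]
  have hc : k + x = x + k := by ring
  rw [hc, List.append_assoc]

theorem main_invariant (k : Int) (arr : List Int) :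
    (((PySem.List.enumerate arr).foldl (aStep k) (PySem.Dict.empty, [])).2
        = find_diff_hash_map_alt arr k)
    ∧ (∀ v, ((PySem.List.enumerate arr).foldl (aStep k) (PySem.Dict.empty, [])).1.get? v
        = if idxs arr arr.length v = [] then none else some (idxs arr arr.length v)) := by
  induction arr using List.reverseRecOn with
  | nil =>
      constructor
      · rfl
      · intro v; simp [PySem.List.enumerate, idxs, PySem.Dict.get?_empty]
  | append_singleton xs x ih =>
      obtain ⟨ihres, ihd⟩ := ih
      set st := (PySem.List.enumerate xs).foldl (aStep k) (PySem.Dict.empty, []) with hst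
      set n : Int := ((xs.length : Nat) : Int) with hn
      have hfold : (PySem.List.enumerate (xs ++ [x])).foldl (aStep k) (PySem.Dict.empty, [])
          = aStep k st (n, x) := by
        rw [PySem.List.enumerate_append, List.foldl_append, ← hst]
        simp [PySem.List.enumerate]
        rw [hn]
      rw [hfold]
      have hL1 := ihd (x - k)
      have hL2 := ihd (k + x)
      have hd : (aStep k st (n, x)).1
          = match st.1.get? x with
            | some _ => st.1.modify x [] (fun l => l ++ [n])
            | none => st.1.insert x [n] := rfl
      -- the result component after the two complement lookups
      have hres : (aStep k st (n, x)).2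
          = st.2 ++ (idxs xs xs.length (x - k)).map (fun j => (j, n))
                 ++ (idxs xs xs.length (k + x)).map (fun j => (j, n)) := by
        simp only [aStep, hL1, hL2]
        split_ifs <;> simp only [foldl_pairs] <;> simp_all
      constructor
      · rw [hres, ihres, alt_append, hn]
      · intro v
        have hlen : (xs ++ [x]).length = xs.length + 1 := by simp
        rw [hd, hlen, idxs_append]
        by_cases hx0 : idxs xs xs.length x = []
        · -- key x not yet present: insert a fresh singleton list
          have hsc : st.1.get? x = none := by rw [ihd x, if_pos hx0]
          simp only [hsc]
          rw [PySem.Dict.get?_insert]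
          by_cases hv : v = x
          · subst hv
            simp [hx0, hn]
          · have hxv : ¬ x = v := fun h => hv h.symm
            simp [hv, hxv, ihd v]
        · -- key x already present: append the new index to its list
          have hsc : st.1.get? x = some (idxs xs xs.length x) := by rw [ihd x, if_neg hx0]
          simp only [hsc]
          rw [dict_get?_modify]
          by_cases hv : v = x
          · subst hv
            have hgd : st.1.getD v [] = idxs xs xs.length v := by
              rw [PySem.Dict.getD_eq_get?_getD, hsc]
              rfl
            simp [hgd, hn]
          · have hxv : ¬ x = v := fun h => hv h.symm
            simp [hv, hxv, ihd v]

-- ===== VERDICT (by name: the statement is the Claim_ definition above) =====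
theorem find_diff_hash_map_spec : Claim_equal_find_diff_hash_map := by
  intro arr k _
  unfold Spec_find_diff_hash_map find_diff_hash_map
  exact (main_invariant k arr).1
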